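-- pv_equiv track=rewrite | github.com/shahardo/MessageIXDataManager | src/analysis/base_analyzer.py | _map_technologies_to_sectors_by_name
-- ===== SOURCE A (Python) =====
-- from typing import Dict, List, Optional, Any, Tuple
--
-- def _map_technologies_to_sectors_by_name(technologies: List[str],
--                                           sector_tecs: Dict[str, List[str]]) -> Dict[str, List[str]]:
--     """Fallback: Map technologies to sectors by name patterns."""
--     sector_patterns = {
--         "Power": ["_ppl", "coal_ppl", "gas_ppl", "oil_ppl", "bio_ppl", "hydro", "wind", "solar",
--                   "nuclear", "geo_ppl", "igcc", "stor_ppl", "elec_t_d", "grid"],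
--         "Transport": ["_trp", "transport", "vehicle", "car_", "bus_", "truck_", "train_",
--                       "ship_", "air_", "moto_"],
--         "Industry": ["_i", "ind_", "industry", "furnace_", "cement", "steel", "aluminum",
--                      "petro", "refin"],
--         "Buildings": ["_rc", "rc_", "resid", "comm_", "heat_", "cool_", "light_", "appl_"],
--         "Feedstock": ["_feed", "feedstock", "petrochem"],
--     }
--
--     for tec in technologies:
--         tec_lower = tec.lower()
--         assigned = False
--         for sector, patterns in sector_patterns.items():
--             if any(pattern in tec_lower for pattern in patterns):
--                 sector_tecs[sector].append(tec)
--                 assigned = True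
--                 break
--         if not assigned:
--             sector_tecs["Other"].append(tec)
--
--     return sector_tecs
-- ===== SOURCE B (Python) =====
-- def _map_technologies_to_sectors_by_name(technologies, sector_tecs):
--     """Fallback: Map technologies to sectors by name patterns (sector-major traversal)."""
--     sector_patterns = {
--         "Power": ["_ppl", "coal_ppl", "gas_ppl", "oil_ppl", "bio_ppl", "hydro", "wind", "solar",
--                   "nuclear", "geo_ppl", "igcc", "stor_ppl", "elec_t_d", "grid"],
--         "Transport": ["_trp", "transport", "vehicle", "car_", "bus_", "truck_", "train_",
--                       "ship_", "air_", "moto_"],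
--         "Industry": ["_i", "ind_", "industry", "furnace_", "cement", "steel", "aluminum",
--                      "petro", "refin"],
--         "Buildings": ["_rc", "rc_", "resid", "comm_", "heat_", "cool_", "light_", "appl_"],
--         "Feedstock": ["_feed", "feedstock", "petrochem"],
--     }
--
--     def matches(tec_lower, patterns):
--         return any(p in tec_lower for p in patterns)
--
--     earlier = []  # patterns of all sectors already processed
--     for sector, patterns in sector_patterns.items():
--         for tec in technologies:
--             tl = tec.lower()
--             if matches(tl, patterns) and not matches(tl, earlier):
--                 sector_tecs[sector].append(tec)
--         earlier += patterns
--     for tec in technologies: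
--         if not matches(tec.lower(), earlier):
--             sector_tecs["Other"].append(tec)
--     return sector_tecs
-- ===== Notes on version B (the rewrite author's own statement) =====
-- stated objective: alternative
-- what changed: Technology-major loop with a per-tec assigned flag and break is replaced by a sector-major traversal: for each sector in order, append every technology matching its patterns but none of the earlier sectors' patterns (an accumulated flat pattern list replaces the break/flag), then fill 'Other' with technologies matching no pattern at all.
import Mathlib
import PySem

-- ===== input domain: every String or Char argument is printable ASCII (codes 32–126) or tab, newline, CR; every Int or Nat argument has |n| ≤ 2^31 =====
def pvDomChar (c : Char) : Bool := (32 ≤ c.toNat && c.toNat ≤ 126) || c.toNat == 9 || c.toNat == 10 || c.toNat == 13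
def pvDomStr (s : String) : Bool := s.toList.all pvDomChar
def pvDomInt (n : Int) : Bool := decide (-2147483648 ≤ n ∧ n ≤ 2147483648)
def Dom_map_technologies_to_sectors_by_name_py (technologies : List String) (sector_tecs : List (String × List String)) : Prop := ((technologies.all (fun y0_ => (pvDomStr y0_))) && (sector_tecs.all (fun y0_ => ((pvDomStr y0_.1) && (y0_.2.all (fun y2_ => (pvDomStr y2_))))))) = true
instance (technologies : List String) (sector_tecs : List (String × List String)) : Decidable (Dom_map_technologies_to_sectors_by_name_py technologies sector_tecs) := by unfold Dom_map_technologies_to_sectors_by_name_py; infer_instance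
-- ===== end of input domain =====

-- B replaces A's technology-major loop (per-tec flag + break) by a sector-major traversal with an
-- accumulated "earlier patterns" list; equivalence of the RETURN value is proved (Python A and B both
-- mutate sector_tecs in place; the claim is about the returned dict). Pre_ excludes exactly the inputs
-- where the Pythons raise KeyError (a needed sector key absent from sector_tecs).


-- shared literal pattern table (the same constant appears in both Pythons)
def pvPatterns : List (String × List String) :=
  [("Power", ["_ppl", "coal_ppl", "gas_ppl", "oil_ppl", "bio_ppl", "hydro", "wind", "solar",
              "nuclear", "geo_ppl", "igcc", "stor_ppl", "elec_t_d", "grid"]),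
   ("Transport", ["_trp", "transport", "vehicle", "car_", "bus_", "truck_", "train_",
                  "ship_", "air_", "moto_"]),
   ("Industry", ["_i", "ind_", "industry", "furnace_", "cement", "steel", "aluminum",
                 "petro", "refin"]),
   ("Buildings", ["_rc", "rc_", "resid", "comm_", "heat_", "cool_", "light_", "appl_"]),
   ("Feedstock", ["_feed", "feedstock", "petrochem"])]

-- sector_tecs[key].append(v): append v to the value at the first entry with this key
-- (no-op when the key is absent — Python raises KeyError there; Pre_ excludes those inputs)
def dictAppend : List (String × List String) → String → String → List (String × List String)
  | [], _, _ => []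
  | (k, vs) :: rest, key, v =>
      if k = key then (k, vs ++ [v]) :: rest else (k, vs) :: dictAppend rest key v

-- any(pattern in tec_lower for pattern in patterns)
def matchesAny (tl : String) (ps : List String) : Bool := ps.any (fun p => PySem.Str.isIn p tl)

-- ===== PORT A =====
-- inner 'for sector, patterns in sector_patterns.items(): … break' + trailing 'if not assigned'
def assignA : List (String × List String) → List (String × List String) → String → String → List (String × List String)
  | [], d, _, tec => dictAppend d "Other" tec
  | (s, ps) :: rest, d, tl, tec =>
      if matchesAny tl ps then dictAppend d s tec else assignA rest d tl tec

def map_technologies_to_sectors_by_name_py (technologies : List String) (sector_tecs : List (String × List String)) : List (String × List String) :=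
  technologies.foldl (fun d tec => assignA pvPatterns d (PySem.Str.lower tec) tec) sector_tecs

-- ===== PORT B =====
def map_technologies_to_sectors_by_name_py_alt (technologies : List String) (sector_tecs : List (String × List String)) : List (String × List String) :=
  let st := pvPatterns.foldl
    (fun (acc : List (String × List String) × List String) sp =>
      (technologies.foldl
        (fun d tec =>
          let tl := PySem.Str.lower tec
          if matchesAny tl sp.2 && !matchesAny tl acc.2 then dictAppend d sp.1 tec else d)
        acc.1,
       acc.2 ++ sp.2))
    (sector_tecs, [])
  technologies.foldl
    (fun d tec => if !matchesAny (PySem.Str.lower tec) st.2 then dictAppend d "Other" tec else d)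
    st.1

-- ===== PRECONDITION & SPEC =====
-- the sector a technology is assigned to (first matching sector, else "Other")
def pvClassify (tec : String) : String :=
  match pvPatterns.find? (fun sp => matchesAny (PySem.Str.lower tec) sp.2) with
  | some sp => sp.1
  | none => "Other"

-- Pre_ excludes exactly the inputs on which the Python raises KeyError: some technology's
-- target sector is not a key of sector_tecs.
def Pre_map_technologies_to_sectors_by_name_py (technologies : List String) (sector_tecs : List (String × List String)) : Prop :=
  ∀ tec ∈ technologies, pvClassify tec ∈ sector_tecs.map Prod.fst

instance (technologies : List String) (sector_tecs : List (String × List String)) : Decidable (Pre_map_technologies_to_sectors_by_name_py technologies sector_tecs) := by unfold Pre_map_technologies_to_sectors_by_name_py; infer_instance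

def pvWitness_map_technologies_to_sectors_by_name_py : List String × (List (String × List String)) :=
  (["coal_ppl", "bus_x", "xyz"], [("Power", ["w"]), ("Transport", []), ("Other", [])])

def Spec_map_technologies_to_sectors_by_name_py (technologies : List String) (sector_tecs : List (String × List String)) (out : List (String × List String)) : Prop := out = map_technologies_to_sectors_by_name_py_alt technologies sector_tecs
instance (technologies : List String) (sector_tecs : List (String × List String)) (out : List (String × List String)) : Decidable (Spec_map_technologies_to_sectors_by_name_py technologies sector_tecs out) := by unfold Spec_map_technologies_to_sectors_by_name_py; infer_instance

-- ===== CLAIM (what is proved, stated in full; the proofs are below) =====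
def Claim_equal_map_technologies_to_sectors_by_name_py : Prop := ∀ (technologies : List String) (sector_tecs : List (String × List String)), Dom_map_technologies_to_sectors_by_name_py technologies sector_tecs → Pre_map_technologies_to_sectors_by_name_py technologies sector_tecs → Spec_map_technologies_to_sectors_by_name_py technologies sector_tecs (map_technologies_to_sectors_by_name_py technologies sector_tecs)

-- ===== LEMMAS AND PROOFS =====

-- proof-only machinery: both ports are shown equal to 'pvApply d L' for per-key-equal op lists L
def pvApply (d : List (String × List String)) (L : List (String × String)) : List (String × List String) :=
  L.foldl (fun d kv => dictAppend d kv.1 kv.2) d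

def pvSel (k : String) (L : List (String × String)) : List String :=
  (L.filter (fun kv => kv.1 == k)).map (·.2)

def pvCls (pats : List (String × List String)) (t : String) : Option String :=
  (pats.find? (fun sp => matchesAny (PySem.Str.lower t) sp.2)).map (·.1)

-- the op list produced by B's sector-major phase
def pvOps (tech : List String) : List (String × List String) → List String → List (String × String)
  | [], _ => []
  | (s, ps) :: rest, seen =>
      ((tech.filter (fun t => matchesAny (PySem.Str.lower t) ps && !matchesAny (PySem.Str.lower t) seen)).map (fun t => (s, t)))
        ++ pvOps tech rest (seen ++ ps)

theorem pvApply_nil (L : List (String × String)) : pvApply [] L = [] := by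
  induction L with
  | nil => rfl
  | cons kv L ih => simpa [pvApply, dictAppend] using ih

theorem pvApply_append (d : List (String × List String)) (L1 L2 : List (String × String)) :
    pvApply d (L1 ++ L2) = pvApply (pvApply d L1) L2 := by
  simp [pvApply, List.foldl_append]

theorem pvApply_cons (k : String) (vs : List String) (rest : List (String × List String)) (L : List (String × String)) :
    pvApply ((k, vs) :: rest) L = (k, vs ++ pvSel k L) :: pvApply rest (L.filter (fun kv => kv.1 != k)) := by
  induction L generalizing vs rest with
  | nil => simp [pvApply, pvSel]
  | cons kv L ih =>
    by_cases h : kv.1 = k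
    · have : dictAppend ((k, vs) :: rest) kv.1 kv.2 = (k, vs ++ [kv.2]) :: rest := by
        simp [dictAppend, h]
      simp only [pvApply, List.foldl_cons] at *
      rw [this, ih]
      simp [pvSel, h, bne]
    · have : dictAppend ((k, vs) :: rest) kv.1 kv.2 = (k, vs) :: dictAppend rest kv.1 kv.2 := by
        simp [dictAppend]; intro hk; exact absurd hk.symm h
      simp only [pvApply, List.foldl_cons] at *
      rw [this, ih]
      simp [pvSel, h, bne]

theorem pvSel_filter_ne (k k' : String) (L : List (String × String)) :
    pvSel k' (L.filter (fun kv => kv.1 != k)) = if k' = k then [] else pvSel k' L := by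
  induction L with
  | nil => simp [pvSel]
  | cons kv L ih =>
    by_cases h : kv.1 = k
    · by_cases h' : kv.1 = k' <;> simp_all [pvSel, bne]
    · by_cases h' : kv.1 = k' <;> simp_all [pvSel, bne]

theorem pvApply_congr (d : List (String × List String)) (L L' : List (String × String))
    (h : ∀ k, pvSel k L = pvSel k L') : pvApply d L = pvApply d L' := by
  induction d generalizing L L' with
  | nil => rw [pvApply_nil, pvApply_nil]
  | cons e rest ih =>
    obtain ⟨k, vs⟩ := e
    rw [pvApply_cons, pvApply_cons, h k]
    congr 1
    apply ih
    intro k'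
    rw [pvSel_filter_ne, pvSel_filter_ne, h k']

theorem pvSel_append (k : String) (L1 L2 : List (String × String)) :
    pvSel k (L1 ++ L2) = pvSel k L1 ++ pvSel k L2 := by
  simp [pvSel]

theorem pvSel_map_const (k s : String) (l : List String) :
    pvSel k (l.map (fun t => (s, t))) = if s = k then l else [] := by
  induction l with
  | nil => simp [pvSel]
  | cons t l ih => by_cases h : s = k <;> simp_all [pvSel]

theorem pvSel_map_classify (k : String) (l : List String) (f : String → String) :
    pvSel k (l.map (fun t => (f t, t))) = l.filter (fun t => f t == k) := by
  induction l with
  | nil => simp [pvSel]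
  | cons t l ih => by_cases h : f t = k <;> simp_all [pvSel]

-- ----- A side -----
theorem assignA_eq (pats : List (String × List String)) (d : List (String × List String)) (tec : String) :
    assignA pats d (PySem.Str.lower tec) tec = dictAppend d ((pvCls pats tec).getD "Other") tec := by
  induction pats generalizing d with
  | nil => simp [assignA, pvCls]
  | cons sp rest ih =>
    obtain ⟨s, ps⟩ := sp
    by_cases h : matchesAny (PySem.Str.lower tec) ps <;>
      simp [assignA, pvCls, List.find?, h, ih]

theorem A_eq_apply (tech : List String) (d : List (String × List String)) :
    map_technologies_to_sectors_by_name_py tech d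
      = pvApply d (tech.map (fun t => ((pvCls pvPatterns t).getD "Other", t))) := by
  induction tech generalizing d with
  | nil => rfl
  | cons t tech ih =>
    simp only [map_technologies_to_sectors_by_name_py, List.foldl_cons, List.map_cons, pvApply,
      List.foldl_cons] at *
    rw [assignA_eq]
    exact ih _

-- ----- B side -----
theorem innerB_eq (tech : List String) (d : List (String × List String)) (s : String) (c : String → Bool) :
    tech.foldl (fun d tec => if c tec then dictAppend d s tec else d) d
      = pvApply d ((tech.filter c).map (fun t => (s, t))) := by
  induction tech generalizing d with
  | nil => rfl
  | cons t tech ih =>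
    simp only [List.foldl_cons, List.filter_cons]
    by_cases h : c t
    · simp only [h, if_pos, List.map_cons, pvApply, List.foldl_cons]
      exact ih _
    · simp only [h, Bool.false_eq_true, if_false]
      exact ih _

theorem foldB_eq (tech : List String) (pats : List (String × List String)) (d : List (String × List String)) (seen : List String) :
    pats.foldl
      (fun (acc : List (String × List String) × List String) sp =>
        (tech.foldl
          (fun d tec =>
            let tl := PySem.Str.lower tec
            if matchesAny tl sp.2 && !matchesAny tl acc.2 then dictAppend d sp.1 tec else d)
          acc.1,
         acc.2 ++ sp.2))
      (d, seen)
    = (pvApply d (pvOps tech pats seen), seen ++ pats.flatMap (·.2)) := by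
  induction pats generalizing d seen with
  | nil => simp [pvOps, pvApply]
  | cons sp rest ih =>
    obtain ⟨s, ps⟩ := sp
    simp only [List.foldl_cons]
    rw [ih]
    rw [innerB_eq tech d s (fun tec => matchesAny (PySem.Str.lower tec) ps && !matchesAny (PySem.Str.lower tec) seen)]
    simp [pvOps, pvApply_append, List.flatMap_cons, List.append_assoc]

theorem B_eq_apply (tech : List String) (d : List (String × List String)) :
    map_technologies_to_sectors_by_name_py_alt tech d
      = pvApply d (pvOps tech pvPatterns []
          ++ (tech.filter (fun t => !matchesAny (PySem.Str.lower t) (pvPatterns.flatMap (·.2)))).map (fun t => ("Other", t))) := by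
  unfold map_technologies_to_sectors_by_name_py_alt
  rw [foldB_eq]
  rw [innerB_eq tech _ "Other" (fun t => !matchesAny (PySem.Str.lower t) ([] ++ pvPatterns.flatMap (·.2)))]
  rw [pvApply_append]
  simp

-- ----- per-key op lists coincide -----
theorem matchesAny_append (tl : String) (a b : List String) :
    matchesAny tl (a ++ b) = (matchesAny tl a || matchesAny tl b) := by
  simp [matchesAny, List.any_append]

theorem pvCls_cons_pos (sp : String × List String) (rest : List (String × List String)) (t : String)
    (hm : matchesAny (PySem.Str.lower t) sp.2 = true) : pvCls (sp :: rest) t = some sp.1 := by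
  unfold pvCls
  rw [List.find?_cons, hm]
  rfl

theorem pvCls_cons_neg (sp : String × List String) (rest : List (String × List String)) (t : String)
    (hm : matchesAny (PySem.Str.lower t) sp.2 = false) : pvCls (sp :: rest) t = pvCls rest t := by
  unfold pvCls
  rw [List.find?_cons, hm]

theorem pvCls_mem (pats : List (String × List String)) (t k : String) (h : pvCls pats t = some k) :
    k ∈ pats.map Prod.fst := by
  induction pats with
  | nil => simp [pvCls] at h
  | cons sp rest ih =>
    by_cases hm : matchesAny (PySem.Str.lower t) sp.2
    · rw [pvCls_cons_pos sp rest t hm] at h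
      simp at h
      simp [h]
    · rw [pvCls_cons_neg sp rest t (by simpa using hm)] at h
      simp [ih h]

theorem pvCls_none_iff (pats : List (String × List String)) (t : String) :
    pvCls pats t = none ↔ matchesAny (PySem.Str.lower t) (pats.flatMap (·.2)) = false := by
  induction pats with
  | nil => simp [pvCls, matchesAny]
  | cons sp rest ih =>
    by_cases hm : matchesAny (PySem.Str.lower t) sp.2
    · rw [pvCls_cons_pos sp rest t hm]
      simp [List.flatMap_cons, matchesAny_append, hm]
    · rw [pvCls_cons_neg sp rest t (by simpa using hm)]
      simp [List.flatMap_cons, matchesAny_append, hm, ih]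

theorem pvSel_ops (tech : List String) (pats : List (String × List String))
    (hnd : (pats.map Prod.fst).Nodup) (k : String) (seen : List String) :
    pvSel k (pvOps tech pats seen)
      = tech.filter (fun t => !matchesAny (PySem.Str.lower t) seen && (pvCls pats t == some k)) := by
  induction pats generalizing seen with
  | nil => simp [pvOps, pvSel, pvCls]
  | cons sp rest ih =>
    obtain ⟨s, ps⟩ := sp
    simp only [List.map_cons, List.nodup_cons] at hnd
    rw [pvOps, pvSel_append, pvSel_map_const, ih hnd.2]
    by_cases hk : s = k
    · subst hk
      have hrest : ∀ t, (pvCls rest t == some s) = false := by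
        intro t
        cases h : pvCls rest t with
        | none => simp
        | some k' =>
          have hne : k' ≠ s := fun hq => hnd.1 (hq ▸ pvCls_mem rest t k' h)
          simp [hne]
      have h2 : tech.filter (fun t => !matchesAny (PySem.Str.lower t) (seen ++ ps) && (pvCls rest t == some s)) = [] := by
        apply List.filter_eq_nil_iff.mpr
        intro t _
        simp [hrest t]
      rw [if_pos rfl, h2, List.append_nil]
      apply List.filter_congr
      intro t _
      by_cases hm : matchesAny (PySem.Str.lower t) ps
      · rw [pvCls_cons_pos (s, ps) rest t hm]
        simp [hm, Bool.and_comm]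
      · rw [pvCls_cons_neg (s, ps) rest t (by simpa using hm)]
        simp [hm, hrest t]
    · rw [if_neg hk, List.nil_append]
      apply List.filter_congr
      intro t _
      by_cases hm : matchesAny (PySem.Str.lower t) ps
      · rw [pvCls_cons_pos (s, ps) rest t hm]
        simp [matchesAny_append, hm, hk]
      · rw [pvCls_cons_neg (s, ps) rest t (by simpa using hm)]
        simp [matchesAny_append, hm]

theorem pvPatterns_nodup : (pvPatterns.map Prod.fst).Nodup := by decide
theorem other_not_mem : "Other" ∉ pvPatterns.map Prod.fst := by decide

theorem cls_ne_other (t : String) : pvCls pvPatterns t ≠ some "Other" := by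
  intro h
  exact other_not_mem (pvCls_mem pvPatterns t "Other" h)

theorem sel_A_eq_sel_B (tech : List String) (k : String) :
    pvSel k (tech.map (fun t => ((pvCls pvPatterns t).getD "Other", t)))
      = pvSel k (pvOps tech pvPatterns []
          ++ (tech.filter (fun t => !matchesAny (PySem.Str.lower t) (pvPatterns.flatMap (·.2)))).map (fun t => ("Other", t))) := by
  rw [pvSel_map_classify, pvSel_append, pvSel_ops tech pvPatterns pvPatterns_nodup k [], pvSel_map_const]
  by_cases hk : "Other" = k
  · subst hk
    have h1 : tech.filter (fun t => !matchesAny (PySem.Str.lower t) [] && (pvCls pvPatterns t == some "Other")) = [] := by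
      apply List.filter_eq_nil_iff.mpr
      intro t _
      simp [matchesAny, cls_ne_other t]
    rw [h1, if_pos rfl, List.nil_append]
    apply List.filter_congr
    intro t _
    cases h : pvCls pvPatterns t with
    | none =>
      have := (pvCls_none_iff pvPatterns t).mp h
      simp [this]
    | some k' =>
      have hne : k' ≠ "Other" := fun hq => cls_ne_other t (hq ▸ h)
      have hm : matchesAny (PySem.Str.lower t) (pvPatterns.flatMap (·.2)) = true := by
        cases hq : matchesAny (PySem.Str.lower t) (pvPatterns.flatMap (·.2)) with
        | false =>
          have := (pvCls_none_iff pvPatterns t).mpr hq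
          rw [h] at this; cases this
        | true => rfl
      simp [hne, hm]
  · rw [if_neg hk, List.append_nil]
    apply List.filter_congr
    intro t _
    cases h : pvCls pvPatterns t with
    | none => simp [matchesAny, hk]
    | some k' => simp [matchesAny]

-- ===== VERDICT (by name: the statement is the Claim_ definition above) =====
theorem map_technologies_to_sectors_by_name_py_spec : Claim_equal_map_technologies_to_sectors_by_name_py := by
  intro technologies sector_tecs _ _
  unfold Spec_map_technologies_to_sectors_by_name_py
  rw [A_eq_apply, B_eq_apply]
  exact pvApply_congr _ _ _ (sel_A_eq_sel_B technologies)
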